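-- pv_equiv track=rewrite | github.com/pypi-data/pypi-mirror-231 | packages/hak/hak-0.0.147.tar.gz/hak-0.0.147/hak/many/dicts/get_keys_with_none_or_zero_vals.py | f
-- ===== SOURCE A (Python) =====
-- def f(x):
--   all_keys = set([k for x_i in x for k in x_i])
--   keys_with_values = set([])
--
--   for x_i in x:
--     for k in x_i:
--       if not any([x_i[k] is None, x_i[k] == 0, x_i[k] == '']):
--         keys_with_values.add(k)
--         # keys.remove(k)
--
--   return all_keys - keys_with_values
-- ===== SOURCE B (Python) =====
-- def f(x):
--   all_keys = set([k for x_i in x for k in x_i])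
--   return {k for k in all_keys
--           if all(x_i[k] is None or x_i[k] == 0 or x_i[k] == ''
--                  for x_i in x if k in x_i)}
-- ===== Notes on version B (the rewrite author's own statement) =====
-- stated objective: simpler
-- what changed: Instead of accumulating a keys_with_values set over all dicts and set-subtracting it from all_keys, B builds the result directly as one set comprehension keeping each key for which every dict containing it has a None/0/'' value (keys-outer, dicts-inner, no auxiliary set).
import Mathlib
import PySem

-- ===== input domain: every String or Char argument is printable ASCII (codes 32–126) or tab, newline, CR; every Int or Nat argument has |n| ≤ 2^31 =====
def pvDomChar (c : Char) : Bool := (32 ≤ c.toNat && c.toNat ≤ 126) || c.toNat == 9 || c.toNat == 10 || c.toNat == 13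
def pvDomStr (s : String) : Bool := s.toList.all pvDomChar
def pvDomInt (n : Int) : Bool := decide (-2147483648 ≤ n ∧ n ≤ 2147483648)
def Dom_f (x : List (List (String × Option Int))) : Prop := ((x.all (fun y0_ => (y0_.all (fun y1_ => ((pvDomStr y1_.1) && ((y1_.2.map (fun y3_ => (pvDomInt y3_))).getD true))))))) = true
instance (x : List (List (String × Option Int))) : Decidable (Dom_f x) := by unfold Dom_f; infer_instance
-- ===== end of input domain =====

-- B replaces A's "collect keys-with-values, then set-subtract" with a direct per-key
-- universal emptiness test over the dicts that contain the key (objective: simpler).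


-- ===== PORT A =====
-- Each inner assoc list denotes a Python dict: PySem.Dict.ofList gives dict key order /
-- overwrite semantics.  x_i[k] with k drawn from the dict's own keys never raises, so it
-- is ported as getD k none (exact there).  'x_i[k] == ""' compares an Optional[int]
-- value with a string, which is always False in Python: ported as the literal false.
def f (x : List (List (String × Option Int))) : List String :=
  let all_keys : PySem.Set String :=
    PySem.Set.ofList (x.flatMap (fun x_i => (PySem.Dict.ofList x_i).keys))
  let keys_with_values : PySem.Set String :=
    x.foldl (fun s x_i =>
      let d := PySem.Dict.ofList x_i
      d.keys.foldl (fun s k =>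
        if !([d.getD k none == none, d.getD k none == some 0, false].any id) then
          PySem.Set.add s k
        else s) s)
      PySem.Set.empty
  PySem.Set.diff all_keys keys_with_values

-- ===== PORT B =====
-- same Python-dict reading; the '' comparison is again the literal false
def f_alt (x : List (List (String × Option Int))) : List String :=
  let dicts := x.map (fun x_i => PySem.Dict.ofList x_i)
  let all_keys : PySem.Set String :=
    PySem.Set.ofList (dicts.flatMap (fun d => d.keys))
  all_keys.filter (fun k =>
    dicts.all (fun d =>
      !(d.contains k) || (d.getD k none == none || d.getD k none == some 0 || false)))

-- ===== PRECONDITION & SPEC =====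
def Spec_f (x : List (List (String × Option Int))) (out : List String) : Prop := out = f_alt x
instance (x : List (List (String × Option Int))) (out : List String) : Decidable (Spec_f x out) := by unfold Spec_f; infer_instance

-- ===== CLAIM (what is proved, stated in full; the proofs are below) =====
def Claim_equal_f : Prop := ∀ (x : List (List (String × Option Int))), Dom_f x → Spec_f x (f x)

-- ===== LEMMAS AND PROOFS =====

-- membership in the inner conditional-add loop
theorem mem_foldl_addIf (l : List String) (p : String → Bool) (s : PySem.Set String) (y : String) :
    y ∈ l.foldl (fun s k => if p k then PySem.Set.add s k else s) s ↔
      y ∈ s ∨ (y ∈ l ∧ p y = true) := by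
  induction l generalizing s with
  | nil => simp
  | cons a t ih =>
    simp only [List.foldl_cons]
    by_cases hpa : p a = true
    · rw [if_pos hpa]
      rw [ih]
      simp only [PySem.Set.mem_add]
      constructor
      · rintro (⟨h | rfl⟩ | h)
        · exact Or.inl h
        · exact Or.inr ⟨List.mem_cons_self, hpa⟩
        · exact Or.inr ⟨List.mem_cons_of_mem _ h.1, h.2⟩
      · rintro (h | ⟨hm, hp⟩)
        · exact Or.inl (Or.inl h)
        · rcases List.mem_cons.mp hm with rfl | hm
          · exact Or.inl (Or.inr rfl)
          · exact Or.inr ⟨hm, hp⟩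
    · rw [if_neg hpa]
      rw [ih]
      constructor
      · rintro (h | h)
        · exact Or.inl h
        · exact Or.inr ⟨List.mem_cons_of_mem _ h.1, h.2⟩
      · rintro (h | ⟨hm, hp⟩)
        · exact Or.inl h
        · rcases List.mem_cons.mp hm with rfl | hm
          · exact absurd hp hpa
          · exact Or.inr ⟨hm, hp⟩

-- membership in A's keys_with_values accumulator
theorem mem_kwv (x : List (List (String × Option Int))) (s : PySem.Set String) (y : String) :
    y ∈ x.foldl (fun s x_i =>
        let d := PySem.Dict.ofList x_i
        d.keys.foldl (fun s k =>
          if !([d.getD k none == none, d.getD k none == some 0, false].any id) then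
            PySem.Set.add s k
          else s) s) s ↔
      y ∈ s ∨ ∃ x_i ∈ x, y ∈ (PySem.Dict.ofList x_i).keys ∧
        ¬((PySem.Dict.ofList x_i).getD y none = none ∨
          (PySem.Dict.ofList x_i).getD y none = some 0) := by
  induction x generalizing s with
  | nil => simp
  | cons a t ih =>
    simp only [List.foldl_cons, ih, mem_foldl_addIf]
    constructor
    · rintro ((h | ⟨hm, hp⟩) | ⟨x_i, hx, h⟩)
      · exact Or.inl h
      · refine Or.inr ⟨a, List.mem_cons_self, hm, ?_⟩
        simpa [Option.isSome_iff_ne_none, not_or] using hp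
      · exact Or.inr ⟨x_i, List.mem_cons_of_mem _ hx, h⟩
    · rintro (h | ⟨x_i, hx, hm, hp⟩)
      · exact Or.inl (Or.inl h)
      · rcases List.mem_cons.mp hx with rfl | hx
        · refine Or.inl (Or.inr ⟨hm, ?_⟩)
          simpa [Option.isSome_iff_ne_none, not_or] using hp
        · exact Or.inr ⟨x_i, hx, hm, hp⟩

-- ===== VERDICT (by name: the statement is the Claim_ definition above) =====
theorem f_spec : Claim_equal_f := by
  intro x _
  show f x = f_alt x
  unfold f f_alt
  simp only [PySem.Set.diff, List.flatMap_map]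
  refine List.filter_congr ?_
  intro k _
  apply Bool.eq_iff_iff.mpr
  have hmem := mem_kwv x PySem.Set.empty k
  simp only [PySem.Set.empty, List.not_mem_nil, false_or] at hmem
  have hA : (!PySem.Set.contains
      (x.foldl (fun s x_i =>
        let d := PySem.Dict.ofList x_i
        d.keys.foldl (fun s k =>
          if !([d.getD k none == none, d.getD k none == some 0, false].any id) then
            PySem.Set.add s k
          else s) s) PySem.Set.empty) k) = true ↔
      (∀ x_i ∈ x, k ∈ (PySem.Dict.ofList x_i).keys →
        ((PySem.Dict.ofList x_i).getD k none = none ∨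
         (PySem.Dict.ofList x_i).getD k none = some 0)) := by
    simp only [PySem.Set.empty]
    rw [Bool.not_eq_eq_eq_not, Bool.not_true, ← Bool.not_eq_true, PySem.Set.contains_iff, hmem]
    push Not
    constructor
    · intro h x_i hx hm
      by_contra hv
      exact (h x_i hx hm).elim (fun h1 => hv (Or.inl h1)) (fun h2 => hv (Or.inr h2))
    · intro h x_i hx hm
      rcases h x_i hx hm with h1 | h2
      · exact Or.inl h1
      · exact Or.inr h2
  have hB : ((x.map (fun x_i => PySem.Dict.ofList x_i)).all (fun d =>
      !(d.contains k) || (d.getD k none == none || d.getD k none == some 0 || false))) = true ↔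
      (∀ x_i ∈ x, k ∈ (PySem.Dict.ofList x_i).keys →
        ((PySem.Dict.ofList x_i).getD k none = none ∨
         (PySem.Dict.ofList x_i).getD k none = some 0)) := by
    simp only [List.all_map, List.all_eq_true, Function.comp, Bool.or_false, Bool.or_eq_true,
      Bool.not_eq_eq_eq_not, Bool.not_true, beq_iff_eq]
    constructor
    · intro h x_i hx hm
      rcases h x_i hx with hc | hv
      · rw [← PySem.Dict.contains_iff_mem_keys] at hm
        rw [hm] at hc
        exact absurd hc (by decide)
      · exact hv
    · intro h x_i hx
      by_cases hc : (PySem.Dict.ofList x_i).contains k = true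
      · exact Or.inr (h x_i hx (Iff.mp (PySem.Dict.contains_iff_mem_keys _ _) hc))
      · exact Or.inl (by simpa using hc)
  exact hA.trans hB.symm
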